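-- pv_equiv track=rewrite | github.com/TaranRoth/torus-knots | invs/pinch.py | find_preimage
-- ===== SOURCE A (Python) =====
-- def find_preimage(p_start, q_start, hit_list=[], max_search=1000):
--     for p_prev in range(2, max_search):
--         for q_prev in range(2, max_search):
--             try:
--                 q_inv = pow(q_prev, -1, p_prev)
--                 t = (-q_inv) % p_prev
--                 u = pow(p_prev, -1, q_prev) % q_prev
--
--                 p_candidate = p_prev - 2 * t
--                 q_candidate = q_prev - 2 * u
--
--                 if p_candidate == p_start and q_candidate == q_start:
--                     hit_list.append((p_prev, q_prev))
--
--             except ValueError: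
--                 # Skip if inverse doesn't exist
--                 continue
--     return sorted(hit_list, key=lambda x: x[0])
-- ===== SOURCE B (Python) =====
-- def find_preimage(p_start, q_start, hit_list=[], max_search=1000):
--     # No modular inversions: a pair matches iff t2=(p_prev-p_start)/2 and
--     # u2=(q_prev-q_start)/2 are integers in range with q_prev*t2 = -1 (mod p_prev)
--     # and p_prev*u2 = 1 (mod q_prev); the t2 test skips whole inner loops.
--     for p_prev in range(2, max_search):
--         dp = p_prev - p_start
--         if dp % 2 != 0:
--             continue
--         t2 = dp // 2
--         if not (1 <= t2 < p_prev):
--             continue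
--         for q_prev in range(2, max_search):
--             dq = q_prev - q_start
--             if dq % 2 != 0:
--                 continue
--             u2 = dq // 2
--             if not (1 <= u2 < q_prev):
--                 continue
--             if (q_prev * t2) % p_prev == p_prev - 1 and (p_prev * u2) % q_prev == 1:
--                 hit_list.append((p_prev, q_prev))
--     return sorted(hit_list, key=lambda x: x[0])
-- ===== Notes on version B (the rewrite author's own statement) =====
-- stated objective: faster
-- what changed: B computes no modular inverses: it derives t2=(p_prev-p_start)/2 and u2=(q_prev-q_start)/2 directly, skips the whole inner loop when t2 is out of range, and tests the candidate by the multiplicative congruences q_prev*t2 = -1 (mod p_prev) and p_prev*u2 = 1 (mod q_prev).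
import Mathlib
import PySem

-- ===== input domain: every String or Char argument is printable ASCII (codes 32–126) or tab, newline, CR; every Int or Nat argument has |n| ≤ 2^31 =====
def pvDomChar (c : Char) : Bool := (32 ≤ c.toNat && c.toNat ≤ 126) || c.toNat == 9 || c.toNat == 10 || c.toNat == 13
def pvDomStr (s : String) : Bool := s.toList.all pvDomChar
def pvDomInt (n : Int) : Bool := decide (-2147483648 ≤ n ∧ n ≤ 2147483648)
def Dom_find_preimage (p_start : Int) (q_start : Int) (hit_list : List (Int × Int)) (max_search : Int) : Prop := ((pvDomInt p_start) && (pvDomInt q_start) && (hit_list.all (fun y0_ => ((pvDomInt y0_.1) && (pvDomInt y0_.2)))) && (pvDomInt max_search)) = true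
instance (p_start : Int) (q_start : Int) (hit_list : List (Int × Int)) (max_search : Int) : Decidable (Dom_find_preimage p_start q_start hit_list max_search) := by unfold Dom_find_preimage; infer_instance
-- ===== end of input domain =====

-- B replaces every modular inversion of A by direct congruence checks on the derived
-- candidates t2=(p_prev-p_start)/2, u2=(q_prev-q_start)/2, skipping whole inner loops;
-- equivalence is about the return value (both Pythons append the hits to hit_list in the same order).

-- ===== PORT A =====
-- Python pow(a, -1, m) for m > 0: ValueError (none) iff gcd(a,m) ≠ 1, else the inverse in [0,m) via Bézout
def pyInvMod? (a m : Int) : Option Int :=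
  if Int.gcd a m = 1 then some (PySem.Int.mod (Int.gcdA a m) m) else none

def find_preimage (p_start : Int) (q_start : Int) (hit_list : List (Int × Int)) (max_search : Int) : List (Int × Int) :=
  let hl := (PySem.List.pyRange 2 max_search 1).foldl (fun hl p_prev =>
    (PySem.List.pyRange 2 max_search 1).foldl (fun hl q_prev =>
      match pyInvMod? q_prev p_prev with
      | none => hl   -- except ValueError: continue
      | some q_inv =>
        let t := PySem.Int.mod (-q_inv) p_prev
        match pyInvMod? p_prev q_prev with
        | none => hl -- except ValueError: continue
        | some pinv =>
          let u := PySem.Int.mod pinv q_prev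
          let p_candidate := p_prev - 2 * t
          let q_candidate := q_prev - 2 * u
          if p_candidate = p_start ∧ q_candidate = q_start then hl ++ [(p_prev, q_prev)]
          else hl) hl) hit_list
  PySem.List.sorted hl (fun x => x.1) false

-- ===== PORT B =====
def find_preimage_alt (p_start : Int) (q_start : Int) (hit_list : List (Int × Int)) (max_search : Int) : List (Int × Int) :=
  let hl := (PySem.List.pyRange 2 max_search 1).foldl (fun hl p_prev =>
    let dp := p_prev - p_start
    if PySem.Int.mod dp 2 ≠ 0 then hl
    else
      let t2 := PySem.Int.floordiv dp 2
      if ¬ (1 ≤ t2 ∧ t2 < p_prev) then hl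
      else
        (PySem.List.pyRange 2 max_search 1).foldl (fun hl q_prev =>
          let dq := q_prev - q_start
          if PySem.Int.mod dq 2 ≠ 0 then hl
          else
            let u2 := PySem.Int.floordiv dq 2
            if ¬ (1 ≤ u2 ∧ u2 < q_prev) then hl
            else if PySem.Int.mod (q_prev * t2) p_prev = p_prev - 1 ∧ PySem.Int.mod (p_prev * u2) q_prev = 1
                 then hl ++ [(p_prev, q_prev)] else hl) hl) hit_list
  PySem.List.sorted hl (fun x => x.1) false

-- ===== PRECONDITION & SPEC =====
def Spec_find_preimage (p_start : Int) (q_start : Int) (hit_list : List (Int × Int)) (max_search : Int) (out : List (Int × Int)) : Prop := out = find_preimage_alt p_start q_start hit_list max_search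
instance (p_start : Int) (q_start : Int) (hit_list : List (Int × Int)) (max_search : Int) (out : List (Int × Int)) : Decidable (Spec_find_preimage p_start q_start hit_list max_search out) := by unfold Spec_find_preimage; infer_instance

-- ===== CLAIM (what is proved, stated in full; the proofs are below) =====
def Claim_equal_find_preimage : Prop := ∀ (p_start : Int) (q_start : Int) (hit_list : List (Int × Int)) (max_search : Int), Dom_find_preimage p_start q_start hit_list max_search → Spec_find_preimage p_start q_start hit_list max_search (find_preimage p_start q_start hit_list max_search)

-- ===== LEMMAS AND PROOFS =====

-- A's append condition for the pair (p, q)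
def CA (ps qs p q : Int) : Bool :=
  decide (Int.gcd q p = 1 ∧
    p - 2 * PySem.Int.mod (-(PySem.Int.mod (Int.gcdA q p) p)) p = ps ∧
    q - 2 * PySem.Int.mod (PySem.Int.mod (Int.gcdA p q) q) q = qs)

-- B's p-level check
def PC (ps p : Int) : Bool :=
  decide (PySem.Int.mod (p - ps) 2 = 0 ∧ 1 ≤ PySem.Int.floordiv (p - ps) 2 ∧ PySem.Int.floordiv (p - ps) 2 < p)

-- B's q-level check
def CB (ps qs p q : Int) : Bool :=
  decide (PySem.Int.mod (q - qs) 2 = 0 ∧ 1 ≤ PySem.Int.floordiv (q - qs) 2 ∧ PySem.Int.floordiv (q - qs) 2 < q ∧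
    PySem.Int.mod (q * PySem.Int.floordiv (p - ps) 2) p = p - 1 ∧
    PySem.Int.mod (p * PySem.Int.floordiv (q - qs) 2) q = 1)

lemma pvInvSpec (a m : Int) (hm : 0 < m) (h : Int.gcd a m = 1) :
    0 ≤ PySem.Int.mod (Int.gcdA a m) m ∧ PySem.Int.mod (Int.gcdA a m) m < m ∧
    m ∣ a * PySem.Int.mod (Int.gcdA a m) m - 1 := by
  rw [PySem.Int.mod_eq_emod_of_pos hm]
  refine ⟨Int.emod_nonneg _ (by omega), Int.emod_lt_of_pos _ hm, ?_⟩
  have hb := Int.gcd_eq_gcd_ab a m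
  rw [h] at hb
  have hmod := Int.emod_add_mul_ediv (Int.gcdA a m) m
  refine ⟨-(Int.gcdB a m) - a * (Int.gcdA a m / m), ?_⟩
  push_cast at hb
  linear_combination a * hmod - hb

lemma pvInvUnique (a m x : Int) (hm : 0 < m) (h : Int.gcd a m = 1) (hx0 : 0 ≤ x) (hxm : x < m)
    (hdvd : m ∣ a * x - 1) : PySem.Int.mod (Int.gcdA a m) m = x := by
  obtain ⟨hy0, hym, hyd⟩ := pvInvSpec a m hm h
  set y := PySem.Int.mod (Int.gcdA a m) m with hy
  have hdxy : m ∣ a * (x - y) := by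
    have : a * (x - y) = (a * x - 1) - (a * y - 1) := by ring
    rw [this]; exact dvd_sub hdvd hyd
  have hcop : IsCoprime (m : Int) a := (Int.isCoprime_iff_gcd_eq_one.mpr h).symm
  have hxy : m ∣ (x - y) := hcop.dvd_of_dvd_mul_left hdxy
  have := Int.eq_zero_of_abs_lt_dvd hxy (by rw [abs_lt]; omega)
  omega

lemma pvGcdOne (a m k : Int) (h : m ∣ a * k - 1) : Int.gcd a m = 1 := by
  obtain ⟨c, hc⟩ := h
  exact Int.isCoprime_iff_gcd_eq_one.mp ⟨k, -c, by linarith⟩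

lemma pvModEq (a b m : Int) (hm : 0 < m) (h : m ∣ a - b) (hb0 : 0 ≤ b) (hbm : b < m) :
    PySem.Int.mod a m = b := by
  rw [PySem.Int.mod_eq_emod_of_pos hm]
  have h1 : a % m = b % m := Int.ModEq.symm (Int.modEq_iff_dvd.mpr (by simpa using h))
  rw [h1, Int.emod_eq_of_lt hb0 hbm]

lemma pvDvdOfMod (a b m : Int) (hm : 0 < m) (h : PySem.Int.mod a m = b) : m ∣ a - b := by
  rw [PySem.Int.mod_eq_emod_of_pos hm] at h
  exact ⟨a / m, by rw [← h]; linarith [Int.mul_ediv_add_emod a m]⟩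

lemma pvFloordivTwo (d t : Int) (h : d = 2 * t) : PySem.Int.floordiv d 2 = t := by
  rw [h, PySem.Int.floordiv_eq_ediv_of_pos (by norm_num)]
  exact Int.mul_ediv_cancel_left t (by norm_num)

lemma key_iff (ps qs p q : Int) (hp : 2 ≤ p) (hq : 2 ≤ q) :
    CA ps qs p q = true ↔ (PC ps p = true ∧ CB ps qs p q = true) := by
  simp only [CA, PC, CB, decide_eq_true_eq, and_assoc]
  have hp0 : (0:Int) < p := by omega
  have hq0 : (0:Int) < q := by omega
  constructor
  · rintro ⟨hg, hA2, hA3⟩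
    have hgpq : Int.gcd p q = 1 := by rw [Int.gcd_comm]; exact hg
    obtain ⟨hX0, hXp, hXd⟩ := pvInvSpec q p hp0 hg
    set X := PySem.Int.mod (Int.gcdA q p) p with hXdef
    set t := PySem.Int.mod (-X) p with htdef
    have ht : t = (-X) % p := by rw [htdef, PySem.Int.mod_eq_emod_of_pos hp0]
    have ht0 : 0 ≤ t := by rw [ht]; exact Int.emod_nonneg _ (by omega)
    have htp : t < p := by rw [ht]; exact Int.emod_lt_of_pos _ hp0
    have htX : p ∣ t + X := by
      refine ⟨-((-X)/p), ?_⟩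
      rw [ht]; linarith [Int.mul_ediv_add_emod (-X) p]
    have hqt : p ∣ q * t + 1 := by
      obtain ⟨c, hc⟩ := htX
      obtain ⟨d, hd⟩ := hXd
      exact ⟨q * c - d, by linear_combination q * hc - hd⟩
    have ht1 : 1 ≤ t := by
      rcases eq_or_lt_of_le ht0 with h0 | h0
      · exfalso
        have hdvd1 : p ∣ 1 := by
          have : q * t + 1 = 1 := by rw [← h0]; ring
          rwa [this] at hqt
        have := Int.le_of_dvd one_pos hdvd1; omega
      · omega
    have hdp : p - ps = 2 * t := by omega
    have hfd : PySem.Int.floordiv (p - ps) 2 = t := pvFloordivTwo _ _ hdp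
    obtain ⟨hY0, hYq, hYd⟩ := pvInvSpec p q hq0 hgpq
    set Y := PySem.Int.mod (Int.gcdA p q) q with hYdef
    have hu : PySem.Int.mod Y q = Y := by
      rw [PySem.Int.mod_eq_emod_of_pos hq0]; exact Int.emod_eq_of_lt hY0 hYq
    rw [hu] at hA3
    have hY1 : 1 ≤ Y := by
      rcases eq_or_lt_of_le hY0 with h0 | h0
      · exfalso
        have hdvd1 : q ∣ 1 := by
          have h1 : p * Y - 1 = -1 := by rw [← h0]; ring
          rw [h1] at hYd
          exact (dvd_neg.mp hYd)
        have := Int.le_of_dvd one_pos hdvd1; omega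
      · omega
    have hdq : q - qs = 2 * Y := by omega
    have hfu : PySem.Int.floordiv (q - qs) 2 = Y := pvFloordivTwo _ _ hdq
    refine ⟨?_, ?_, ?_, ?_, ?_, ?_, ?_, ?_⟩
    · exact pvModEq _ _ _ (by norm_num) ⟨t, by omega⟩ le_rfl (by norm_num)
    · rw [hfd]; exact ht1
    · rw [hfd]; exact htp
    · exact pvModEq _ _ _ (by norm_num) ⟨Y, by omega⟩ le_rfl (by norm_num)
    · rw [hfu]; exact hY1
    · rw [hfu]; exact hYq
    · rw [hfd]
      refine pvModEq _ _ _ hp0 ?_ (by omega) (by omega)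
      obtain ⟨c, hc⟩ := hqt
      exact ⟨c - 1, by linarith⟩
    · rw [hfu]
      exact pvModEq _ _ _ hq0 hYd (by norm_num) (by omega)
  · rintro ⟨hm2, ht1, htp, hu2, hu1, huq, hcq, hcu⟩
    set t2 := PySem.Int.floordiv (p - ps) 2 with ht2def
    set u2 := PySem.Int.floordiv (q - qs) 2 with hu2def
    obtain ⟨c, hc⟩ := pvDvdOfMod _ _ _ (by norm_num) hm2
    have hdp : p - ps = 2 * t2 := by
      rw [ht2def, pvFloordivTwo (p - ps) c (by omega)]; omega
    obtain ⟨c', hc'⟩ := pvDvdOfMod _ _ _ (by norm_num) hu2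
    have hdq : q - qs = 2 * u2 := by
      rw [hu2def, pvFloordivTwo (q - qs) c' (by omega)]; omega
    have hqt : p ∣ q * t2 + 1 := by
      obtain ⟨d, hd⟩ := pvDvdOfMod _ _ _ hp0 hcq
      exact ⟨d + 1, by linarith⟩
    have hg : Int.gcd q p = 1 := by
      refine pvGcdOne q p (-t2) ?_
      obtain ⟨d, hd⟩ := hqt
      exact ⟨-d, by linarith⟩
    have hpu : q ∣ p * u2 - 1 := pvDvdOfMod _ _ _ hq0 hcu
    have hgpq : Int.gcd p q = 1 := pvGcdOne p q u2 hpu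
    have hX : PySem.Int.mod (Int.gcdA q p) p = p - t2 := by
      refine pvInvUnique q p (p - t2) hp0 hg (by omega) (by omega) ?_
      obtain ⟨d, hd⟩ := hqt
      exact ⟨q - d, by linear_combination -hd⟩
    have hY : PySem.Int.mod (Int.gcdA p q) q = u2 := by
      exact pvInvUnique p q u2 hq0 hgpq (by omega) huq hpu
    refine ⟨hg, ?_, ?_⟩
    · rw [hX]
      have ht : PySem.Int.mod (-(p - t2)) p = t2 :=
        pvModEq _ _ _ hp0 ⟨-1, by ring⟩ (by omega) (by omega)
      rw [ht]; omega
    · rw [hY]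
      have hu : PySem.Int.mod u2 q = u2 :=
        pvModEq _ _ _ hq0 ⟨0, by ring⟩ (by omega) huq
      rw [hu]; omega

lemma bodyA_eq (ps qs p : Int) (acc : List (Int × Int)) (q : Int) :
    (match pyInvMod? q p with
     | none => acc
     | some q_inv =>
       let t := PySem.Int.mod (-q_inv) p
       match pyInvMod? p q with
       | none => acc
       | some pinv =>
         let u := PySem.Int.mod pinv q
         let p_candidate := p - 2 * t
         let q_candidate := q - 2 * u
         if p_candidate = ps ∧ q_candidate = qs then acc ++ [(p, q)] else acc)
    = if CA ps qs p q then acc ++ [(p, q)] else acc := by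
  by_cases hg : Int.gcd q p = 1
  · have hg' : Int.gcd p q = 1 := by rw [Int.gcd_comm]; exact hg
    simp [pyInvMod?, CA, hg, hg']
  · have hg' : Int.gcd p q ≠ 1 := by rw [Int.gcd_comm]; exact hg
    simp [pyInvMod?, CA, hg]

lemma innerA_eq (ps qs p m : Int) (acc : List (Int × Int)) :
    ((PySem.List.pyRange 2 m 1).foldl (fun hl q =>
      match pyInvMod? q p with
      | none => hl
      | some q_inv =>
        let t := PySem.Int.mod (-q_inv) p
        match pyInvMod? p q with
        | none => hl
        | some pinv =>
          let u := PySem.Int.mod pinv q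
          let p_candidate := p - 2 * t
          let q_candidate := q - 2 * u
          if p_candidate = ps ∧ q_candidate = qs then hl ++ [(p, q)] else hl) acc)
    = acc ++ ((PySem.List.pyRange 2 m 1).filter (fun q => CA ps qs p q)).map (fun q => (p, q)) := by
  refine (PySem.List.foldl_congr_mem _ _
      (fun hl q => if CA ps qs p q then hl ++ [(p, q)] else hl) acc
      (fun a q _ => bodyA_eq ps qs p a q)).trans ?_
  exact PySem.List.foldl_append_if _ _ _ _

lemma bodyB_eq (ps qs p : Int) (acc : List (Int × Int)) (q : Int) :
    (let dq := q - qs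
     if PySem.Int.mod dq 2 ≠ 0 then acc
     else
       let u2 := PySem.Int.floordiv dq 2
       if ¬ (1 ≤ u2 ∧ u2 < q) then acc
       else if PySem.Int.mod (q * PySem.Int.floordiv (p - ps) 2) p = p - 1 ∧
               PySem.Int.mod (p * u2) q = 1
            then acc ++ [(p, q)] else acc)
    = if CB ps qs p q then acc ++ [(p, q)] else acc := by
  dsimp only
  by_cases hCB : CB ps qs p q = true
  · rw [if_pos hCB]
    simp only [CB, decide_eq_true_eq] at hCB
    obtain ⟨c1, c2, c3, c4, c5⟩ := hCB
    rw [if_neg (not_not_intro c1), if_neg (not_not_intro ⟨c2, c3⟩), if_pos ⟨c4, c5⟩]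
  · rw [if_neg hCB]
    simp only [CB, decide_eq_true_eq] at hCB
    split_ifs with h1 h2 h3 <;> try rfl
    exact absurd ⟨not_not.mp h1, h2.1, h2.2, h3.1, h3.2⟩ hCB

lemma innerB_eq (ps qs p m : Int) (acc : List (Int × Int)) :
    ((PySem.List.pyRange 2 m 1).foldl (fun hl q =>
      let dq := q - qs
      if PySem.Int.mod dq 2 ≠ 0 then hl
      else
        let u2 := PySem.Int.floordiv dq 2
        if ¬ (1 ≤ u2 ∧ u2 < q) then hl
        else if PySem.Int.mod (q * PySem.Int.floordiv (p - ps) 2) p = p - 1 ∧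
                PySem.Int.mod (p * u2) q = 1
             then hl ++ [(p, q)] else hl) acc)
    = acc ++ ((PySem.List.pyRange 2 m 1).filter (fun q => CB ps qs p q)).map (fun q => (p, q)) := by
  refine (PySem.List.foldl_congr_mem _ _
      (fun hl q => if CB ps qs p q then hl ++ [(p, q)] else hl) acc
      (fun a q _ => bodyB_eq ps qs p a q)).trans ?_
  exact PySem.List.foldl_append_if _ _ _ _

lemma outer_eq (ps qs p m : Int) (hp : 2 ≤ p) (acc : List (Int × Int)) :
    acc ++ ((PySem.List.pyRange 2 m 1).filter (fun q => CA ps qs p q)).map (fun q => (p, q))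
    = (let dp := p - ps
       if PySem.Int.mod dp 2 ≠ 0 then acc
       else
         let t2 := PySem.Int.floordiv dp 2
         if ¬ (1 ≤ t2 ∧ t2 < p) then acc
         else acc ++ ((PySem.List.pyRange 2 m 1).filter (fun q => CB ps qs p q)).map (fun q => (p, q))) := by
  dsimp only
  by_cases hPC : PC ps p = true
  · have hPC' := hPC
    simp only [PC, decide_eq_true_eq] at hPC'
    obtain ⟨c1, c2, c3⟩ := hPC'
    rw [if_neg (not_not_intro c1), if_neg (not_not_intro ⟨c2, c3⟩)]
    congr 2
    refine List.filter_congr ?_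
    intro q hq
    have hq2 : 2 ≤ q := (PySem.List.mem_pyRange_one.mp hq).1
    rw [Bool.eq_iff_iff, key_iff ps qs p q hp hq2]
    simp [hPC]
  · have hfil : ((PySem.List.pyRange 2 m 1).filter (fun q => CA ps qs p q)) = [] := by
      rw [List.filter_eq_nil_iff]
      intro q hq
      have hq2 : 2 ≤ q := (PySem.List.mem_pyRange_one.mp hq).1
      intro hCA
      exact hPC ((key_iff ps qs p q hp hq2).mp hCA).1
    rw [hfil]
    simp only [List.map_nil, List.append_nil]
    simp only [PC, decide_eq_true_eq] at hPC
    split_ifs with h1 h2 <;> try rfl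
    exact absurd ⟨not_not.mp h1, h2.1, h2.2⟩ hPC

-- ===== VERDICT (by name: the statement is the Claim_ definition above) =====
theorem find_preimage_spec : Claim_equal_find_preimage := by
  unfold Claim_equal_find_preimage Spec_find_preimage
  intro ps qs hl m _
  unfold find_preimage find_preimage_alt
  dsimp only
  congr 1
  refine PySem.List.foldl_congr_mem _ _ _ hl ?_
  intro acc p hpmem
  have hp2 : 2 ≤ p := (PySem.List.mem_pyRange_one.mp hpmem).1
  rw [innerA_eq ps qs p m acc]
  exact (outer_eq ps qs p m hp2 acc).trans (by rw [innerB_eq ps qs p m acc])
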